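-- pv_equiv track=rewrite | github.com/robkeim/random | AdventOfCode/2019/day24.py | hash_state
-- ===== SOURCE A (Python) =====
-- def hash_state(bugs):
--     result = ""
--     for y in range(5):
--         for x in range(5):
--             if (x, y) in bugs:
--                 result += "#"
--             else:
--                 result += "."
--         result += "\n"
--
--     return result
-- ===== SOURCE B (Python) =====
-- def hash_state(bugs):
--     grid = [["."] * 5 for _ in range(5)]
--     for (x, y) in bugs:
--         if 0 <= x < 5 and 0 <= y < 5:
--             grid[y][x] = "#"
--     return "".join("".join(row) + "\n" for row in grid)
-- ===== Notes on version B (the rewrite author's own statement) =====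
-- stated objective: alternative
-- what changed: Instead of scanning all 25 cells and probing membership of each in bugs, B scatters the bug coordinates into a 5x5 character grid in one pass over bugs and then joins the rows.
import Mathlib
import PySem

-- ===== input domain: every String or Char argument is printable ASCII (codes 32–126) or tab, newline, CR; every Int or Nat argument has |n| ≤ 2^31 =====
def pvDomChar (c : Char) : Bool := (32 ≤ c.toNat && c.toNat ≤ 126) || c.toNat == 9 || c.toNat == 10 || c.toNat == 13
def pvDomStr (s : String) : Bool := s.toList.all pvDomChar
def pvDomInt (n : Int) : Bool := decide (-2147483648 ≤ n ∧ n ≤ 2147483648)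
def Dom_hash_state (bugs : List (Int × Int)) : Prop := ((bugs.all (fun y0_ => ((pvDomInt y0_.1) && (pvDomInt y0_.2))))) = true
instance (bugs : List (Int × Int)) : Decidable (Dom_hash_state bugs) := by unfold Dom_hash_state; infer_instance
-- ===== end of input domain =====

-- B scatters the bug coordinates into a 5x5 character grid in one pass over `bugs` and joins
-- the rows, instead of A's probing `(x, y) in bugs` for each of the 25 cells (alternative decomposition).

-- ===== PORT A =====
-- result += "#" / "." / "\n" is kept as a List Char accumulator (String.append is kernel-opaque);
-- String.ofList at the end.
def hash_state (bugs : List (Int × Int)) : String :=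
  String.ofList <|
    (PySem.List.pyRange 0 5 1).foldl (fun result y =>
      ((PySem.List.pyRange 0 5 1).foldl (fun result x =>
        if (x, y) ∈ bugs then result ++ ['#'] else result ++ ['.']) result) ++ ['\n']) []

-- ===== PORT B =====
-- grid[y][x] = "#" is pySetD/pyGetD (in range thanks to the bounds guard); the final
-- "".join(... + "\n" ...) is the row-joining foldl.
def hash_state_alt (bugs : List (Int × Int)) : String :=
  let grid :=
    bugs.foldl (fun g p =>
      if 0 ≤ p.1 ∧ p.1 < 5 ∧ 0 ≤ p.2 ∧ p.2 < 5 then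
        PySem.List.pySetD g p.2 (PySem.List.pySetD (PySem.List.pyGetD g p.2 []) p.1 '#')
      else g)
      (List.replicate 5 (List.replicate 5 '.'))
  String.ofList (grid.foldl (fun acc row => acc ++ row ++ ['\n']) [])

-- ===== PRECONDITION & SPEC =====
def Spec_hash_state (bugs : List (Int × Int)) (out : String) : Prop := out = hash_state_alt bugs
instance (bugs : List (Int × Int)) (out : String) : Decidable (Spec_hash_state bugs out) := by unfold Spec_hash_state; infer_instance

-- ===== CLAIM (what is proved, stated in full; the proofs are below) =====
def Claim_equal_hash_state : Prop := ∀ (bugs : List (Int × Int)), Dom_hash_state bugs → Spec_hash_state bugs (hash_state bugs)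

-- ===== LEMMAS AND PROOFS =====

-- B's scatter step, named for the lemmas below.
def pvStep (g : List (List Char)) (p : Int × Int) : List (List Char) :=
  if 0 ≤ p.1 ∧ p.1 < 5 ∧ 0 ≤ p.2 ∧ p.2 < 5 then
    PySem.List.pySetD g p.2 (PySem.List.pySetD (PySem.List.pyGetD g p.2 []) p.1 '#')
  else g

def pvShape (g : List (List Char)) : Prop := g.length = 5 ∧ ∀ r ∈ g, r.length = 5

-- the character at column x, row y (defaults never reached in range)
def pvCell (g : List (List Char)) (x y : Nat) : Char := (g[y]?.getD [])[x]?.getD ' '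

lemma pvShape_step (g : List (List Char)) (p : Int × Int) (h : pvShape g) : pvShape (pvStep g p) := by
  obtain ⟨a, b⟩ := p
  obtain ⟨hl, hr⟩ := h
  unfold pvStep
  dsimp only
  split
  · next hb =>
    obtain ⟨ha0, ha5, hb0, hb5⟩ := hb
    have hlt : b.toNat < g.length := by omega
    rw [PySem.List.pySetD_of_nonneg _ _ hb0]
    refine ⟨by simpa using hl, ?_⟩
    intro r hrm
    rcases List.mem_or_eq_of_mem_set hrm with hmem | rfl
    · exact hr r hmem
    · rw [PySem.List.pySetD_of_nonneg _ _ ha0, List.length_set,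
        PySem.List.pyGetD_eq_getElem _ _ hb0 (by omega)]
      exact hr _ (List.getElem_mem hlt)
  · exact ⟨hl, hr⟩

lemma pvCell_step (g : List (List Char)) (p : Int × Int) (x y : Nat) (h : pvShape g)
    (hx : x < 5) (hy : y < 5) :
    pvCell (pvStep g p) x y = if p = ((x : Int), (y : Int)) then '#' else pvCell g x y := by
  obtain ⟨a, b⟩ := p
  obtain ⟨hl, hr⟩ := h
  unfold pvStep pvCell
  dsimp only
  split
  · next hb =>
    obtain ⟨ha0, ha5, hb0, hb5⟩ := hb
    have hblt : b.toNat < g.length := by omega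
    have hrow : g[b.toNat].length = 5 := hr _ (List.getElem_mem hblt)
    rw [PySem.List.pySetD_of_nonneg _ _ hb0, PySem.List.pySetD_of_nonneg _ _ ha0,
      PySem.List.pyGetD_eq_getElem _ _ hb0 (by omega), List.getElem?_set]
    by_cases hyy : b.toNat = y
    · subst hyy
      rw [if_pos rfl, if_pos hblt, Option.getD_some, List.getElem?_set]
      by_cases hxx : a.toNat = x
      · rw [if_pos hxx, if_pos (by omega), Option.getD_some,
          if_pos (by simp only [Prod.mk.injEq]; constructor <;> omega)]
      · rw [if_neg hxx, if_neg (fun hpe => hxx (by simp only [Prod.mk.injEq] at hpe; omega)),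
          List.getElem?_eq_getElem hblt, Option.getD_some]
    · rw [if_neg hyy, if_neg (fun hpe => hyy (by simp only [Prod.mk.injEq] at hpe; omega))]
  · next hb =>
    rw [if_neg (fun hpe => by
      apply hb
      simp only [Prod.mk.injEq] at hpe
      refine ⟨by omega, by omega, by omega, by omega⟩)]

lemma pvCell_foldl (l : List (Int × Int)) (g : List (List Char)) (h : pvShape g)
    (x y : Nat) (hx : x < 5) (hy : y < 5) :
    pvCell (l.foldl pvStep g) x y =
      if ((x : Int), (y : Int)) ∈ l then '#' else pvCell g x y := by
  induction l generalizing g with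
  | nil => simp
  | cons p l ih =>
    rw [List.foldl_cons, ih _ (pvShape_step g p h), pvCell_step g p x y h hx hy]
    by_cases hm : ((x : Int), (y : Int)) ∈ l
    · simp [hm]
    · by_cases hp : p = ((x : Int), (y : Int)) <;>
        simp [hm, hp, List.mem_cons, eq_comm]

lemma pvShape_foldl (l : List (Int × Int)) (g : List (List Char)) (h : pvShape g) :
    pvShape (l.foldl pvStep g) := by
  induction l generalizing g with
  | nil => exact h
  | cons p l ih => exact ih _ (pvShape_step g p h)

lemma pvGrid_eq (bugs : List (Int × Int)) :
    bugs.foldl pvStep (List.replicate 5 (List.replicate 5 '.')) =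
      (List.range 5).map (fun y : Nat => (List.range 5).map (fun x : Nat =>
        if ((x : Int), (y : Int)) ∈ bugs then '#' else '.')) := by
  have h0 : pvShape (List.replicate 5 (List.replicate 5 '.')) := by
    refine ⟨by simp, ?_⟩
    intro r hr
    rw [List.eq_of_mem_replicate hr]
    simp
  have hs := pvShape_foldl bugs _ h0
  apply List.ext_getElem
  · rw [hs.1]
    simp
  · intro y hy1 hy2
    have hy : y < 5 := by rwa [hs.1] at hy1
    have hrowlen : (bugs.foldl pvStep (List.replicate 5 (List.replicate 5 '.')))[y].length = 5 :=
      hs.2 _ (List.getElem_mem hy1)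
    apply List.ext_getElem
    · rw [hrowlen]
      simp
    · intro x hx1 hx2
      have hx : x < 5 := by rwa [hrowlen] at hx1
      have hcell := pvCell_foldl bugs _ h0 x y hx hy
      unfold pvCell at hcell
      rw [List.getElem?_replicate, if_pos hy, Option.getD_some, List.getElem?_replicate,
        if_pos hx, Option.getD_some, List.getElem?_eq_getElem hy1, Option.getD_some,
        List.getElem?_eq_getElem hx1, Option.getD_some] at hcell
      rw [hcell]
      simp only [List.getElem_map, List.getElem_range]

lemma pvIteApp (c : Prop) [Decidable c] (r : List Char) (a b : Char) :
    (if c then r ++ [a] else r ++ [b]) = r ++ [if c then a else b] := by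
  split <;> rfl

lemma pvRange5 : PySem.List.pyRange 0 5 1 = [0, 1, 2, 3, 4] := by decide

-- ===== VERDICT (by name: the statement is the Claim_ definition above) =====
theorem hash_state_spec : Claim_equal_hash_state := by
  intro bugs _
  unfold Spec_hash_state hash_state hash_state_alt
  rw [show (fun (g : List (List Char)) (p : Int × Int) =>
      if 0 ≤ p.1 ∧ p.1 < 5 ∧ 0 ≤ p.2 ∧ p.2 < 5 then
        PySem.List.pySetD g p.2 (PySem.List.pySetD (PySem.List.pyGetD g p.2 []) p.1 '#')
      else g) = pvStep from rfl]
  rw [pvGrid_eq bugs, pvRange5]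
  simp only [List.range_succ, List.range_zero, List.nil_append, List.map_cons, List.map_nil,
    List.foldl_cons, List.foldl_nil, pvIteApp, List.append_assoc, List.cons_append,
    List.nil_append]
  norm_num
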